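-- pv_equiv track=rewrite | github.com/Safaet-Rabbi/Python | Codeforce/1359B.py | min_paving_cost
-- ===== SOURCE A (Python) =====
-- def min_paving_cost(t, test_cases):
--     results = []
--     for case in test_cases:
--         n, m, x, y, grid = case
--         total_cost = 0
--         for row in grid:
--             i = 0
--             while i < m:
--                 if row[i] == '.':
--                     if i + 1 < m and row[i + 1] == '.':
--                         if y < 2 * x:
--                             total_cost += y
--                             i += 2
--                         else:
--                             total_cost += x
--                             i += 1
--                     else:
--                         total_cost += x
--                         i += 1
--                 else:
--                     i += 1
--
--         results.append(total_cost)
--     return results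
-- ===== SOURCE B (Python) =====
-- def min_paving_cost(t, test_cases):
--     results = []
--     for case in test_cases:
--         n, m, x, y, grid = case
--         unit = min(2 * x, y)
--         total = 0
--         for row in grid:
--             run = 0
--             for j in range(m):
--                 if row[j] == '.':
--                     run += 1
--                 else:
--                     total += (run // 2) * unit + (run % 2) * x
--                     run = 0
--             total += (run // 2) * unit + (run % 2) * x
--         results.append(total)
--     return results
-- ===== Notes on version B (the rewrite author's own statement) =====
-- stated objective: simpler
-- what changed: Replaces A's stateful while-loop with index look-ahead by a single left-to-right run-length scan per row: each maximal run of k dots contributes (k//2)*min(2*x,y) + (k%2)*x.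
import Mathlib
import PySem

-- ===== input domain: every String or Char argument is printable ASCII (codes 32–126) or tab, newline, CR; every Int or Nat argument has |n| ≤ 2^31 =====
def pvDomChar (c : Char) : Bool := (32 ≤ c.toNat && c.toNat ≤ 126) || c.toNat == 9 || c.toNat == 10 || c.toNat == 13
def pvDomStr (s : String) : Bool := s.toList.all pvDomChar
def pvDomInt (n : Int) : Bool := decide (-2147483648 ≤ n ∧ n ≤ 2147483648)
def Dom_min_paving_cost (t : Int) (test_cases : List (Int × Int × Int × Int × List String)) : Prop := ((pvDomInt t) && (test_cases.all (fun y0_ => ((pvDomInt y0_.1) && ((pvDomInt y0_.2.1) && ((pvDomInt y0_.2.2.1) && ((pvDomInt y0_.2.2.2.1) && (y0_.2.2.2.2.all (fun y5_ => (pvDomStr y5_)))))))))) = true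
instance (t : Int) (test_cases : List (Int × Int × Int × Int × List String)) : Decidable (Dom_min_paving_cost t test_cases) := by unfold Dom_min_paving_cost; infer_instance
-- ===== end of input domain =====

-- B replaces A's stateful look-ahead greedy index loop by a run-length scan: per maximal run of
-- k dots it adds (k//2)*min(2x,y) + (k%2)*x; objective: simpler (return value only; no mutation).

-- ===== PORT A =====
-- while i < m: greedy with look-ahead (literal port of A's while loop)
def aLoop (row : String) (m x y : Int) (i acc : Int) : Int :=
  if _h : i < m then
    match PySem.Str.pyGet? row i with
    | none => acc  -- Python raises IndexError here; excluded by Pre_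
    | some c =>
      if c = '.' then
        if i + 1 < m then
          match PySem.Str.pyGet? row (i + 1) with
          | none => acc  -- IndexError; excluded by Pre_
          | some c2 =>
            if c2 = '.' then
              if y < 2 * x then aLoop row m x y (i + 2) (acc + y)
              else aLoop row m x y (i + 1) (acc + x)
            else aLoop row m x y (i + 1) (acc + x)
        else aLoop row m x y (i + 1) (acc + x)
      else aLoop row m x y (i + 1) acc
  else acc
termination_by (m - i).toNat
decreasing_by all_goals omega

def min_paving_cost (t : Int) (test_cases : List (Int × Int × Int × Int × List String)) : List Int :=
  test_cases.foldl (fun results case =>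
    match case with
    | (_n, m, x, y, grid) =>
      results ++ [grid.foldl (fun total_cost row => aLoop row m x y 0 total_cost) 0]) []

-- ===== PORT B =====
-- cost of a finished run of `run` dots: (run // 2) * unit + (run % 2) * x
def bFlush (x unit run : Int) : Int :=
  PySem.Int.floordiv run 2 * unit + PySem.Int.mod run 2 * x

-- one character of B's scan; state = (total, current run length)
def bRowStep (x unit : Int) (st : Int × Int) (c : Char) : Int × Int :=
  if c = '.' then (st.1, st.2 + 1) else (st.1 + bFlush x unit st.2, 0)

-- one index j of B's `for j in range(m)` scan over a row
def bIdxStep (x unit : Int) (row : String) (st : Int × Int) (j : Int) : Int × Int :=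
  match PySem.Str.pyGet? row j with
  | none => st  -- Python raises IndexError here; excluded by Pre_
  | some ch => bRowStep x unit st ch

def min_paving_cost_alt (t : Int) (test_cases : List (Int × Int × Int × Int × List String)) : List Int :=
  test_cases.foldl (fun results case =>
    match case with
    | (_n, m, x, y, grid) =>
      let unit := min (2 * x) y
      results ++ [grid.foldl (fun total row =>
        let st := (PySem.List.pyRange 0 m 1).foldl (bIdxStep x unit row) (total, 0)
        st.1 + bFlush x unit st.2) 0]) []

-- ===== PRECONDITION & SPEC =====
-- Pre_ is exactly A's domain: every grid row has length ≥ m (on a shorter row both A and B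
-- raise IndexError).
def Pre_min_paving_cost (t : Int) (test_cases : List (Int × Int × Int × Int × List String)) : Prop :=
  ∀ c ∈ test_cases, ∀ row ∈ c.2.2.2.2, c.2.1 ≤ (row.toList.length : Int)
instance (t : Int) (test_cases : List (Int × Int × Int × Int × List String)) : Decidable (Pre_min_paving_cost t test_cases) := by unfold Pre_min_paving_cost; infer_instance

def pvWitness_min_paving_cost : Int × (List (Int × Int × Int × Int × List String)) :=
  (1, [(1, 3, 1, 1, ["..#", ".#."])])

def Spec_min_paving_cost (t : Int) (test_cases : List (Int × Int × Int × Int × List String)) (out : List Int) : Prop := out = min_paving_cost_alt t test_cases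
instance (t : Int) (test_cases : List (Int × Int × Int × Int × List String)) (out : List Int) : Decidable (Spec_min_paving_cost t test_cases out) := by unfold Spec_min_paving_cost; infer_instance

-- ===== CLAIM (what is proved, stated in full; the proofs are below) =====
def Claim_equal_min_paving_cost : Prop := ∀ (t : Int) (test_cases : List (Int × Int × Int × Int × List String)), Dom_min_paving_cost t test_cases → Pre_min_paving_cost t test_cases → Spec_min_paving_cost t test_cases (min_paving_cost t test_cases)


-- ===== LEMMAS AND PROOFS =====

-- reference cost of a character list (A's greedy, stated recursively)
def ref (x y : Int) : List Char → Int
  | [] => 0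
  | c :: rest =>
    if c = '.' then
      match rest with
      | [] => x
      | c2 :: rest2 =>
        if c2 = '.' then
          if y < 2 * x then y + ref x y rest2
          else x + ref x y (c2 :: rest2)
        else x + ref x y (c2 :: rest2)
    else ref x y rest


lemma ref_cons_not_dot (x y : Int) (c : Char) (cs : List Char) (hc : ¬ c = '.') :
    ref x y (c :: cs) = ref x y cs := by
  cases cs <;> simp [ref, hc]

lemma ref_replicate (x y : Int) (L : List Char) (hL : L.head? ≠ some '.') :
    ∀ k : Nat, ref x y (List.replicate k '.' ++ L)
      = (↑(k / 2)) * (min (2 * x) y) + (↑(k % 2)) * x + ref x y L := by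
  intro k
  induction k using Nat.strong_induction_on with
  | _ k ih =>
    match k with
    | 0 => simp
    | 1 =>
      cases L with
      | nil => simp [ref]
      | cons c2 r2 =>
        have hc2 : ¬ c2 = '.' := by simpa using hL
        simp [ref, hc2]
    | (k + 2) =>
      by_cases hy : y < 2 * x
      · have hmin : min (2 * x) y = y := by omega
        simp only [List.replicate_succ, List.cons_append, ref, hy, if_true, reduceIte]
        rw [ih k (by omega), hmin]
        have h1 : (k + 2) / 2 = k / 2 + 1 := by omega
        have h2 : (k + 2) % 2 = k % 2 := by omega
        rw [h1, h2]; push_cast; ring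
      · have hmin : min (2 * x) y = 2 * x := by omega
        simp only [List.replicate_succ, List.cons_append, ref, hy, if_false, reduceIte]
        rw [show ('.' :: (List.replicate k '.' ++ L)) = List.replicate (k+1) '.' ++ L by
              simp [List.replicate_succ], ih (k + 1) (by omega), hmin]
        have key : (((k+2) / 2 : Nat) : Int) * 2 + (((k+2) % 2 : Nat) : Int)
            = (((k+1) / 2 : Nat) : Int) * 2 + (((k+1) % 2 : Nat) : Int) + 1 := by
          exact_mod_cast congrArg (Nat.cast : Nat → Int) (by omega : ((k+2) / 2) * 2 + (k+2) % 2 = ((k+1) / 2) * 2 + (k+1) % 2 + 1)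
        linear_combination (-x) * key

lemma bFlush_natCast (x y : Int) (k : Nat) :
    bFlush x (min (2 * x) y) (k : Int) = (↑(k / 2)) * (min (2 * x) y) + (↑(k % 2)) * x := by
  have h1 : PySem.Int.floordiv (k : Int) 2 = ((k / 2 : Nat) : Int) := by
    have h := @Int.fdiv_eq_ediv (k:Int) 2
    simp [PySem.Int.floordiv] at h ⊢; omega
  have h2 : PySem.Int.mod (k : Int) 2 = ((k % 2 : Nat) : Int) := by
    have h := @Int.fmod_eq_emod (k:Int) 2
    simp [PySem.Int.mod] at h ⊢; omega
  simp [bFlush, h1, h2]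

lemma bScan_eq (x y : Int) :
    ∀ (cs : List Char) (total : Int) (run : Nat),
      (cs.foldl (bRowStep x (min (2 * x) y)) (total, (run : Int))).1
        + bFlush x (min (2 * x) y) ((cs.foldl (bRowStep x (min (2 * x) y)) (total, (run : Int))).2)
      = total + ref x y (List.replicate run '.' ++ cs) := by
  intro cs
  induction cs with
  | nil =>
    intro total run
    have h := ref_replicate x y [] (by simp) run
    simp only [List.append_nil, ref, add_zero] at h
    simp only [List.foldl_nil, List.append_nil]
    rw [bFlush_natCast, h]
  | cons c cs ih =>
    intro total run
    by_cases hc : c = '.'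
    · subst hc
      simp only [List.foldl_cons, bRowStep, if_pos rfl, if_true, reduceIte]
      have hcast : ((run : Int) + 1) = ((run + 1 : Nat) : Int) := by push_cast; ring
      rw [hcast, ih total (run + 1)]
      congr 1
      rw [show List.replicate (run+1) '.' ++ cs = List.replicate run '.' ++ ('.' :: cs) by
        simp [List.replicate_succ']]
    · simp only [List.foldl_cons, bRowStep, if_neg hc, reduceIte]
      have h0 := ih (total + bFlush x (min (2*x) y) (run : Int)) 0
      simp only [Nat.cast_zero] at h0
      rw [h0]
      rw [bFlush_natCast, ref_replicate x y (c :: cs) (by simpa using hc) run,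
        ref_cons_not_dot x y c cs hc]
      simp
      ring

lemma aLoop_eq (row : String) (m x y : Int) (hm : m ≤ (row.toList.length : Int)) :
    ∀ n (i acc : Int), (m - i).toNat ≤ n → 0 ≤ i →
      aLoop row m x y i acc = acc + ref x y ((row.toList.take m.toNat).drop i.toNat) := by
  intro n
  induction n with
  | zero =>
    intro i acc hn hi
    have hnot : ¬ i < m := by omega
    rw [aLoop, dif_neg hnot]
    have hD : (row.toList.take m.toNat).drop i.toNat = [] :=
      List.drop_eq_nil_of_le (by simp only [List.length_take]; omega)
    rw [hD]; simp [ref]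
  | succ n ih =>
    intro i acc hn hi
    by_cases hlt : i < m
    · rw [aLoop, dif_pos hlt]
      have hilen : i.toNat < row.toList.length := by omega
      have hg : PySem.Str.pyGet? row i = some (row.toList[i.toNat]'hilen) := by
        simp [PySem.Str.pyGet?, PySem.List.pyGet?_of_nonneg row.toList hi, List.getElem?_eq_getElem hilen]
      have hlen : (row.toList.take m.toNat).length = m.toNat := by simp only [List.length_take]; omega
      have hin : i.toNat < (row.toList.take m.toNat).length := by omega
      have hD : (row.toList.take m.toNat).drop i.toNat
          = (row.toList[i.toNat]'hilen) :: (row.toList.take m.toNat).drop (i.toNat + 1) := by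
        rw [List.drop_eq_getElem_cons hin]
        congr 1
        simp [List.getElem_take]
      simp only [hg]
      by_cases hdot : (row.toList[i.toNat]'hilen) = '.'
      · simp only [if_pos hdot]
        by_cases h2 : i + 1 < m
        · have hilen2 : i.toNat + 1 < row.toList.length := by omega
          have hg2 : PySem.Str.pyGet? row (i + 1) = some (row.toList[i.toNat + 1]'hilen2) := by
            have h1 : (0:Int) ≤ i + 1 := by omega
            have h2' : (i + 1).toNat = i.toNat + 1 := by omega
            simp [PySem.Str.pyGet?, PySem.List.pyGet?_of_nonneg row.toList h1, h2',
              List.getElem?_eq_getElem hilen2]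
          have hin2 : i.toNat + 1 < (row.toList.take m.toNat).length := by omega
          have hD2 : (row.toList.take m.toNat).drop (i.toNat + 1)
              = (row.toList[i.toNat + 1]'hilen2) :: (row.toList.take m.toNat).drop (i.toNat + 2) := by
            rw [List.drop_eq_getElem_cons hin2]
            congr 1
            simp [List.getElem_take]
          simp only [if_pos h2, hg2]
          by_cases hdot2 : (row.toList[i.toNat + 1]'hilen2) = '.'
          · by_cases hy : y < 2 * x
            · simp only [if_pos hdot2, if_pos hy]
              rw [ih (i + 2) (acc + y) (by omega) (by omega),
                show (i + 2).toNat = i.toNat + 2 from by omega,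
                hD, hD2, hdot, hdot2]
              simp [ref, hy]
              ring
            · simp only [if_pos hdot2, if_neg hy]
              rw [ih (i + 1) (acc + x) (by omega) (by omega),
                show (i + 1).toNat = i.toNat + 1 from by omega,
                hD, hD2, hdot, hdot2]
              simp [ref, hy]
              ring
          · simp only [if_neg hdot2]
            rw [ih (i + 1) (acc + x) (by omega) (by omega),
              show (i + 1).toNat = i.toNat + 1 from by omega,
              hD, hD2, hdot]
            simp [ref, hdot2]
            ring
        · have hD1 : (row.toList.take m.toNat).drop (i.toNat + 1) = [] :=
            List.drop_eq_nil_of_le (by simp only [List.length_take]; omega)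
          simp only [if_neg h2]
          rw [ih (i + 1) (acc + x) (by omega) (by omega),
            show (i + 1).toNat = i.toNat + 1 from by omega,
            hD, hD1, hdot]
          simp [ref]
      · simp only [if_neg hdot]
        rw [ih (i + 1) acc (by omega) (by omega),
          show (i + 1).toNat = i.toNat + 1 from by omega,
          hD, ref_cons_not_dot x y _ _ hdot]
    · rw [aLoop, dif_neg hlt]
      have hD : (row.toList.take m.toNat).drop i.toNat = [] :=
        List.drop_eq_nil_of_le (by simp only [List.length_take]; omega)
      rw [hD]; simp [ref]


lemma idx_fold (row : String) (m x y : Int) (hm : m ≤ (row.toList.length : Int)) :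
    ∀ n (i : Int) (st : Int × Int), (m - i).toNat ≤ n → 0 ≤ i →
      (PySem.List.pyRange i m 1).foldl (bIdxStep x (min (2 * x) y) row) st
        = ((row.toList.take m.toNat).drop i.toNat).foldl (bRowStep x (min (2 * x) y)) st := by
  intro n
  induction n with
  | zero =>
    intro i st hn hi
    have h0 : (m - i).toNat = 0 := by omega
    rw [PySem.List.pyRange_one, h0,
      List.drop_eq_nil_of_le (by simp only [List.length_take]; omega)]
    simp
  | succ n ih =>
    intro i st hn hi
    by_cases hlt : i < m
    · have hilen : i.toNat < row.toList.length := by omega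
      have hg : PySem.List.pyGet? row.toList i = some (row.toList[i.toNat]'hilen) := by
        rw [PySem.List.pyGet?_of_nonneg row.toList hi, List.getElem?_eq_getElem hilen]
      have hin : i.toNat < (row.toList.take m.toNat).length := by
        simp only [List.length_take]; omega
      have hD : (row.toList.take m.toNat).drop i.toNat
          = (row.toList[i.toNat]'hilen) :: (row.toList.take m.toNat).drop (i.toNat + 1) := by
        rw [List.drop_eq_getElem_cons hin]
        congr 1
        simp [List.getElem_take]
      rw [PySem.List.pyRange_one_cons hlt, List.foldl_cons, hD, List.foldl_cons]
      have hstep : bIdxStep x (min (2 * x) y) row st i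
          = bRowStep x (min (2 * x) y) st (row.toList[i.toNat]'hilen) := by
        simp [bIdxStep, hg]
      rw [hstep, ih (i + 1) _ (by omega) (by omega),
        show (i + 1).toNat = i.toNat + 1 from by omega]
    · have h0 : (m - i).toNat = 0 := by omega
      rw [PySem.List.pyRange_one, h0,
        List.drop_eq_nil_of_le (by simp only [List.length_take]; omega)]
      simp

lemma row_eq (m x y : Int) (row : String) (hml : m ≤ (row.toList.length : Int)) (total : Int) :
    aLoop row m x y 0 total
      = (List.foldl (bIdxStep x (min (2 * x) y) row) (total, 0) (PySem.List.pyRange 0 m 1)).1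
        + bFlush x (min (2 * x) y)
          (List.foldl (bIdxStep x (min (2 * x) y) row) (total, 0) (PySem.List.pyRange 0 m 1)).2 := by
  have hb := bScan_eq x y (row.toList.take m.toNat) total 0
  simp only [Nat.cast_zero, List.replicate_zero, List.nil_append] at hb
  rw [idx_fold row m x y hml m.toNat 0 (total, 0) (by omega) le_rfl]
  simp only [Int.toNat_zero, List.drop_zero]
  rw [hb, aLoop_eq row m x y hml m.toNat 0 total (by omega) le_rfl]
  simp only [Int.toNat_zero, List.drop_zero]

lemma case_eq (m x y : Int) (grid : List String)
    (hrows : ∀ row ∈ grid, m ≤ (row.toList.length : Int)) :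
    grid.foldl (fun total_cost row => aLoop row m x y 0 total_cost) 0
      = grid.foldl (fun total row =>
          let st := (PySem.List.pyRange 0 m 1).foldl (bIdxStep x (min (2 * x) y) row) (total, 0)
          st.1 + bFlush x (min (2 * x) y) st.2) 0 := by
  apply PySem.List.foldl_congr_mem
  intro acc row hrow
  exact row_eq m x y row (hrows row hrow) acc

lemma outer_eq (tcs : List (Int × Int × Int × Int × List String))
    (hPre : ∀ c ∈ tcs, ∀ row ∈ c.2.2.2.2, c.2.1 ≤ (row.toList.length : Int)) :
    ∀ acc : List Int,
      tcs.foldl (fun results case =>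
        match case with
        | (_n, m, x, y, grid) =>
          results ++ [grid.foldl (fun total_cost row => aLoop row m x y 0 total_cost) 0]) acc
      = tcs.foldl (fun results case =>
        match case with
        | (_n, m, x, y, grid) =>
          let unit := min (2 * x) y
          results ++ [grid.foldl (fun total row =>
            let st := (PySem.List.pyRange 0 m 1).foldl (bIdxStep x unit row) (total, 0)
            st.1 + bFlush x unit st.2) 0]) acc := by
  induction tcs with
  | nil => intro acc; rfl
  | cons c rest ih =>
    intro acc
    obtain ⟨n, m, x, y, grid⟩ := c
    have hc := hPre (n, m, x, y, grid) List.mem_cons_self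
    simp only [List.foldl_cons]
    rw [case_eq m x y grid hc]
    exact ih (fun c hmem => hPre c (List.mem_cons_of_mem _ hmem)) _

-- ===== VERDICT (by name: the statement is the Claim_ definition above) =====
theorem min_paving_cost_spec : Claim_equal_min_paving_cost := by
  intro t tcs _ hPre
  unfold Spec_min_paving_cost min_paving_cost min_paving_cost_alt
  exact outer_eq tcs hPre []
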